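-- pv_equiv track=rewrite | github.com/vinaykumar-kayyur/sonic-buildimage | src/sonic-bgpcfgd/staticroutebfd/main.py | reconstruct_static_route_config
-- ===== SOURCE A (Python) =====
-- def reconstruct_static_route_config(original_config, reachable_nexthops):
--     arg_list    = lambda v: v.split(',') if len(v.strip()) != 0 else None
--     bkh_list    = arg_list(original_config['blackhole']) if 'blackhole' in original_config else None
--     nh_list     = arg_list(original_config['nexthop']) if 'nexthop' in original_config else None
--     intf_list   = arg_list(original_config['ifname']) if 'ifname' in original_config else None
--     dist_list   = arg_list(original_config['distance']) if 'distance' in original_config else None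
--     nh_vrf_list = arg_list(original_config['nexthop-vrf']) if 'nexthop-vrf' in original_config else None
--
--     bkh_candidate = ""
--     nh_candidate = ""
--     intf_candidate = ""
--     dist_candidate = ""
--     nh_vrf_candidate = ""
--
--
--     for i in range(len(nh_list)):
--         if (nh_vrf_list[i], nh_list[i]) in reachable_nexthops:
--             bkh_candidate += "," + (bkh_list[i] if bkh_list else "")
--             nh_candidate += "," + (nh_list[i] if nh_list else "")
--             intf_candidate += "," + (intf_list[i] if intf_list else "")
--             dist_candidate += "," + (dist_list[i] if dist_list else "")
--             nh_vrf_candidate += "," + (nh_vrf_list[i] if nh_vrf_list else "")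
--
--     new_config = dict()
--     for key in original_config:
--         if key == "bfd":
--             continue
--         if key == "blackhole":
--             new_config[key] = bkh_candidate[1:]
--         elif key == "nexthop":
--             new_config[key] = nh_candidate[1:]
--         elif key == "ifname":
--             new_config[key] = intf_candidate[1:]
--         elif key == "distance":
--             new_config[key] = dist_candidate[1:]
--         elif key == "nexthop-vrf":
--             new_config[key] = nh_vrf_candidate[1:]
--         else:
--             new_config[key] = original_config[key]
--     new_config["expiry"] = "false"
--
--     return new_config
-- ===== SOURCE B (Python) =====
-- def reconstruct_static_route_config(original_config, reachable_nexthops):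
--     def arg_list(v):
--         return v.split(',') if v.strip() else None
--
--     nh_list = arg_list(original_config['nexthop']) if 'nexthop' in original_config else None
--     nh_vrf_list = arg_list(original_config['nexthop-vrf']) if 'nexthop-vrf' in original_config else None
--
--     keep = [i for i in range(len(nh_list))
--             if (nh_vrf_list[i], nh_list[i]) in reachable_nexthops]
--
--     def joined(key):
--         lst = arg_list(original_config[key]) if key in original_config else None
--         return ','.join((lst[i] if lst else '') for i in keep)
--
--     special = {key: joined(key)
--                for key in ('blackhole', 'nexthop', 'ifname', 'distance', 'nexthop-vrf')}
--
--     new_config = {k: special.get(k, v)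
--                   for k, v in original_config.items() if k != 'bfd'}
--     new_config['expiry'] = 'false'
--     return new_config
-- ===== Notes on version B (the rewrite author's own statement) =====
-- stated objective: idiomatic
-- what changed: B first computes the list of kept indices once, builds each of the five filtered fields with ','.join over that list instead of A's five comma-prefixed string accumulators plus [1:] slices, and rebuilds the result with a dict comprehension over items() with a lookup table for the five special keys instead of A's six-way if/elif chain per key.
import Mathlib
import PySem

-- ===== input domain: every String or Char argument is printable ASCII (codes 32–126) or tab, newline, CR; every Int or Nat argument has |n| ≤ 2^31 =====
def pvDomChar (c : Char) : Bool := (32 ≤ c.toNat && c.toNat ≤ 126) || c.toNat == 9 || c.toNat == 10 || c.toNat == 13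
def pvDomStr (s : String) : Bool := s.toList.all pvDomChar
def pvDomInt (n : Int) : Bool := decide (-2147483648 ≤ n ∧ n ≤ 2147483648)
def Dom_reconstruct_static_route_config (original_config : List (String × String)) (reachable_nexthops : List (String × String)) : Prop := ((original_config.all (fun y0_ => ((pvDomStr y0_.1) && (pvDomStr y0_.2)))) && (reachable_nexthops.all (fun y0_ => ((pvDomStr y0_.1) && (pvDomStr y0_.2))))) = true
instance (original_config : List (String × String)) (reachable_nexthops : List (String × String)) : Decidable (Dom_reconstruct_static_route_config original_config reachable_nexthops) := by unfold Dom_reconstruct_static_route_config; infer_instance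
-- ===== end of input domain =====

-- B replaces A's five comma-prefixed string accumulators and per-key branch loop by a kept-index
-- list, ','.join over it, and a dict comprehension; same return value on all of Pre_ (idiomatic, not faster).

-- ===== PORT A =====
-- arg_list = lambda v: v.split(',') if len(v.strip()) != 0 else None   (split? is some: sep "," ≠ "")
def pvAArgList (v : String) : Option (List String) :=
  if PySem.Str.len (PySem.Str.strip v) ≠ 0 then some ((PySem.Str.split? v ",").getD []) else none

-- (lst[i] if lst else "") where lst may be None; none result = IndexError (excluded by Pre_)
def pvAField (lst? : Option (List String)) (i : Int) : Option String :=
  match lst? with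
  | some l => if l.isEmpty then some "" else PySem.List.pyGet? l i
  | none => some ""

-- one iteration of A's accumulation loop; none = TypeError/IndexError (excluded by Pre_)
def pvAStep (rn : List (String × String)) (bkh? : Option (List String)) (nhl : List String)
    (intf? dist? : Option (List String)) (vrfl : List String)
    (st : String × String × String × String × String) (i : Int) :
    Option (String × String × String × String × String) :=
  (PySem.List.pyGet? vrfl i).bind fun v =>
  (PySem.List.pyGet? nhl i).bind fun x =>
  if (v, x) ∈ rn then
    (pvAField bkh? i).bind fun b =>
    (pvAField (some nhl) i).bind fun n =>
    (pvAField intf? i).bind fun f =>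
    (pvAField dist? i).bind fun dd =>
    (pvAField (some vrfl) i).bind fun vv =>
    some (st.1 ++ "," ++ b, st.2.1 ++ "," ++ n, st.2.2.1 ++ "," ++ f,
          st.2.2.2.1 ++ "," ++ dd, st.2.2.2.2 ++ "," ++ vv)
  else some st

def reconstruct_static_route_config (original_config : List (String × String)) (reachable_nexthops : List (String × String)) : List (String × String) :=
  let d := PySem.Dict.ofList original_config
  let bkh? := (d.get? "blackhole").bind pvAArgList
  let nh? := (d.get? "nexthop").bind pvAArgList
  let intf? := (d.get? "ifname").bind pvAArgList
  let dist? := (d.get? "distance").bind pvAArgList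
  let vrf? := (d.get? "nexthop-vrf").bind pvAArgList
  match nh?, vrf? with
  | some nhl, some vrfl =>
    match List.foldlM (pvAStep reachable_nexthops bkh? nhl intf? dist? vrfl)
        ("", "", "", "", "") (PySem.List.pyRange 0 (nhl.length : Int) 1) with
    | none => []  -- Python A raises (TypeError/IndexError) here; excluded by Pre_
    | some (bc, nc, ic, dc, vc) =>
      let nc' := d.keys.foldl (fun acc key =>
        if key == "bfd" then acc
        else if key == "blackhole" then acc.insert key (PySem.Str.slice bc (some 1) none)
        else if key == "nexthop" then acc.insert key (PySem.Str.slice nc (some 1) none)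
        else if key == "ifname" then acc.insert key (PySem.Str.slice ic (some 1) none)
        else if key == "distance" then acc.insert key (PySem.Str.slice dc (some 1) none)
        else if key == "nexthop-vrf" then acc.insert key (PySem.Str.slice vc (some 1) none)
        else acc.insert key ((d.get? key).getD "")) PySem.Dict.empty
      (nc'.insert "expiry" "false").items
  | _, _ => []  -- len(None) / None[i]: Python A raises TypeError; excluded by Pre_

-- ===== PORT B =====
-- arg_list(v) = v.split(',') if v.strip() else None
def pvBArgList (v : String) : Option (List String) :=
  if PySem.Str.strip v ≠ "" then some ((PySem.Str.split? v ",").getD []) else none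

-- (lst[i] if lst else ''); pyGetD is exact here: Pre_ keeps every kept index in range
def pvBField (lst? : Option (List String)) (i : Int) : String :=
  match lst? with
  | some l => if l.isEmpty then "" else PySem.List.pyGetD l i ""
  | none => ""

def reconstruct_static_route_config_alt (original_config : List (String × String)) (reachable_nexthops : List (String × String)) : List (String × String) :=
  let d := PySem.Dict.ofList original_config
  match (d.get? "nexthop").bind pvBArgList with
  | none => []
  | some nhl =>
  match (d.get? "nexthop-vrf").bind pvBArgList with
  | none => []
  | some vrfl =>
    if nhl.length ≤ vrfl.length then  -- totality guard: otherwise Python B raises IndexError (excluded by Pre_)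
      let keep := (PySem.List.pyRange 0 (nhl.length : Int) 1).filter
        (fun i => decide ((PySem.List.pyGetD vrfl i "", PySem.List.pyGetD nhl i "") ∈ reachable_nexthops))
      let joined := fun (key : String) =>
        PySem.Str.join "," (keep.map (pvBField ((d.get? key).bind pvBArgList)))
      let special := PySem.Dict.ofList
        [("blackhole", joined "blackhole"), ("nexthop", joined "nexthop"), ("ifname", joined "ifname"),
         ("distance", joined "distance"), ("nexthop-vrf", joined "nexthop-vrf")]
      let nc := PySem.Dict.ofList (d.items.filterMap (fun kv =>
        if kv.1 == "bfd" then none else some (kv.1, special.getD kv.1 kv.2)))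
      (nc.insert "expiry" "false").items
    else []

-- ===== PRECONDITION & SPEC =====
def pvPreAux (lst? : Option (List String)) (k : Nat) : Bool :=
  match lst? with
  | some l => decide (k < l.length)
  | none => true

-- Pre_ = exactly the inputs where Python A returns normally: 'nexthop' and 'nexthop-vrf' present with
-- non-blank values (else len(None)/None[i] TypeError), the vrf list at least as long as the nexthop list
-- (else IndexError), and each present auxiliary list long enough at every index kept by the filter (else IndexError).
def Pre_reconstruct_static_route_config (original_config : List (String × String)) (reachable_nexthops : List (String × String)) : Prop :=
  (match ((PySem.Dict.ofList original_config).get? "nexthop").bind pvAArgList with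
   | none => false
   | some nhl =>
   match ((PySem.Dict.ofList original_config).get? "nexthop-vrf").bind pvAArgList with
   | none => false
   | some vrfl =>
     decide (nhl.length ≤ vrfl.length) &&
     (List.range nhl.length).all (fun k =>
       !decide ((vrfl.getD k "", nhl.getD k "") ∈ reachable_nexthops) ||
       (pvPreAux (((PySem.Dict.ofList original_config).get? "blackhole").bind pvAArgList) k &&
        pvPreAux (((PySem.Dict.ofList original_config).get? "ifname").bind pvAArgList) k &&
        pvPreAux (((PySem.Dict.ofList original_config).get? "distance").bind pvAArgList) k))) = true

instance (original_config : List (String × String)) (reachable_nexthops : List (String × String)) : Decidable (Pre_reconstruct_static_route_config original_config reachable_nexthops) := by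
  unfold Pre_reconstruct_static_route_config; infer_instance

def pvWitness_reconstruct_static_route_config : (List (String × String)) × (List (String × String)) :=
  ([("nexthop", "10.0.0.1"), ("nexthop-vrf", "default"), ("ifname", "Eth0")], [("default", "10.0.0.1")])

def Spec_reconstruct_static_route_config (original_config : List (String × String)) (reachable_nexthops : List (String × String)) (out : List (String × String)) : Prop := out = reconstruct_static_route_config_alt original_config reachable_nexthops
instance (original_config : List (String × String)) (reachable_nexthops : List (String × String)) (out : List (String × String)) : Decidable (Spec_reconstruct_static_route_config original_config reachable_nexthops out) := by unfold Spec_reconstruct_static_route_config; infer_instance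

-- ===== CLAIM (what is proved, stated in full; the proofs are below) =====
def Claim_equal_reconstruct_static_route_config : Prop := ∀ (original_config : List (String × String)) (reachable_nexthops : List (String × String)), Dom_reconstruct_static_route_config original_config reachable_nexthops → Pre_reconstruct_static_route_config original_config reachable_nexthops → Spec_reconstruct_static_route_config original_config reachable_nexthops (reconstruct_static_route_config original_config reachable_nexthops)

-- ===== LEMMAS AND PROOFS =====

theorem pvArgList_eq : pvBArgList = pvAArgList := by
  funext v
  unfold pvAArgList pvBArgList PySem.Str.len
  by_cases h : PySem.Str.strip v = "" <;> simp [h]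
  · intro hlen
    apply h
    rw [← String.toList_inj]
    simpa using hlen

-- comma-prefixed concatenation: what A's loop accumulates per field
def pvCat (ys : List String) : String :=
  match ys with
  | [] => ""
  | y :: r => "," ++ y ++ pvCat r

theorem pvCat_toList (ys : List String) :
    (pvCat ys).toList = (ys.map (fun y => ',' :: y.toList)).flatten := by
  induction ys with
  | nil => rfl
  | cons y r ih => simp [pvCat, ih]

theorem pvCat_slice (ys : List String) :
    PySem.Str.slice (pvCat ys) (some 1) none = PySem.Str.join "," ys := by
  rw [← String.toList_inj, PySem.Str.toList_slice, PySem.Str.toList_join]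
  simp only [PySem.Chars.slice_eq_listSlice, PySem.List.slice_from_one, pvCat_toList]
  induction ys with
  | nil => simp [PySem.Chars.join_nil]
  | cons y r ih =>
    cases r with
    | nil => simp [PySem.Chars.join_singleton]
    | cons y2 r2 =>
      rw [show List.map String.toList (y :: y2 :: r2) = y.toList :: y2.toList :: List.map String.toList r2 by simp,
        PySem.Chars.join_cons_cons]
      simpa using ih

theorem pvAField_eq (lst? : Option (List String)) (k : Nat) (h : pvPreAux lst? k = true) :
    pvAField lst? (k : Int) = some (pvBField lst? (k : Int)) := by
  cases lst? with
  | none => rfl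
  | some l =>
    simp only [pvPreAux, decide_eq_true_eq] at h
    have hne : l.isEmpty = false := by
      cases l with
      | nil => simp at h
      | cons a r => rfl
    simp [pvAField, pvBField, hne, PySem.List.pyGet?_natCast, PySem.List.pyGetD_natCast,
      List.getElem?_eq_getElem h]

theorem pvLoopA (rn : List (String × String)) (bkh? intf? dist? : Option (List String))
    (nhl vrfl : List String) (hlen : nhl.length ≤ vrfl.length) :
    ∀ (idxs : List Int)
      (_ : ∀ i ∈ idxs, ∃ k : Nat, i = (k : Int) ∧ k < nhl.length ∧
        ((PySem.List.pyGetD vrfl i "", PySem.List.pyGetD nhl i "") ∈ rn →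
          pvPreAux bkh? k = true ∧ pvPreAux intf? k = true ∧ pvPreAux dist? k = true))
      (st : String × String × String × String × String),
      List.foldlM (pvAStep rn bkh? nhl intf? dist? vrfl) st idxs
        = some
          (st.1 ++ pvCat ((idxs.filter (fun i => decide ((PySem.List.pyGetD vrfl i "", PySem.List.pyGetD nhl i "") ∈ rn))).map (pvBField bkh?)),
           st.2.1 ++ pvCat ((idxs.filter (fun i => decide ((PySem.List.pyGetD vrfl i "", PySem.List.pyGetD nhl i "") ∈ rn))).map (pvBField (some nhl))),
           st.2.2.1 ++ pvCat ((idxs.filter (fun i => decide ((PySem.List.pyGetD vrfl i "", PySem.List.pyGetD nhl i "") ∈ rn))).map (pvBField intf?)),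
           st.2.2.2.1 ++ pvCat ((idxs.filter (fun i => decide ((PySem.List.pyGetD vrfl i "", PySem.List.pyGetD nhl i "") ∈ rn))).map (pvBField dist?)),
           st.2.2.2.2 ++ pvCat ((idxs.filter (fun i => decide ((PySem.List.pyGetD vrfl i "", PySem.List.pyGetD nhl i "") ∈ rn))).map (pvBField (some vrfl)))) := by
  intro idxs
  induction idxs with
  | nil => intro _ st; simp [pvCat]
  | cons i idxs ih =>
    intro hmem st
    obtain ⟨k, rfl, hk, haux⟩ := hmem i List.mem_cons_self
    have hkv : k < vrfl.length := lt_of_lt_of_le hk hlen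
    have hgv : PySem.List.pyGetD vrfl (k : Int) "" = vrfl[k] := by
      rw [PySem.List.pyGetD_natCast, List.getD_eq_getElem _ _ hkv]
    have hgn : PySem.List.pyGetD nhl (k : Int) "" = nhl[k] := by
      rw [PySem.List.pyGetD_natCast, List.getD_eq_getElem _ _ hk]
    have hih := ih (fun j hj => hmem j (List.mem_cons_of_mem _ hj))
    rw [List.foldlM_cons]
    by_cases hc : (vrfl[k], nhl[k]) ∈ rn
    · have hauxc := haux (by rw [hgv, hgn]; exact hc)
      have hstep : pvAStep rn bkh? nhl intf? dist? vrfl st (k : Int)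
          = some (st.1 ++ "," ++ pvBField bkh? (k : Int), st.2.1 ++ "," ++ pvBField (some nhl) (k : Int),
              st.2.2.1 ++ "," ++ pvBField intf? (k : Int), st.2.2.2.1 ++ "," ++ pvBField dist? (k : Int),
              st.2.2.2.2 ++ "," ++ pvBField (some vrfl) (k : Int)) := by
        unfold pvAStep
        rw [PySem.List.pyGet?_natCast, PySem.List.pyGet?_natCast,
          List.getElem?_eq_getElem hkv, List.getElem?_eq_getElem hk]
        simp only [Option.bind_some]
        rw [if_pos hc]
        rw [pvAField_eq bkh? k hauxc.1, pvAField_eq (some nhl) k (by simp [pvPreAux, hk]),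
            pvAField_eq intf? k hauxc.2.1, pvAField_eq dist? k hauxc.2.2,
            pvAField_eq (some vrfl) k (by simp [pvPreAux, hkv])]
        simp only [Option.bind_some]
      rw [hstep]
      have hpred : decide ((PySem.List.pyGetD vrfl ((k : Nat) : Int) "", PySem.List.pyGetD nhl ((k : Nat) : Int) "") ∈ rn) = true := by
        simp only [hgv, hgn, decide_eq_true_eq]; exact hc
      simp only [Option.bind_eq_bind, Option.bind_some]
      rw [hih]
      simp [pvCat, String.append_assoc, hgv, hgn, hc]
    · have hstep : pvAStep rn bkh? nhl intf? dist? vrfl st (k : Int) = some st := by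
        unfold pvAStep
        rw [PySem.List.pyGet?_natCast, PySem.List.pyGet?_natCast,
          List.getElem?_eq_getElem hkv, List.getElem?_eq_getElem hk]
        simp only [Option.bind_some]
        rw [if_neg hc]
      rw [hstep]
      have hpred : decide ((PySem.List.pyGetD vrfl ((k : Nat) : Int) "", PySem.List.pyGetD nhl ((k : Nat) : Int) "") ∈ rn) = false := by
        simp only [hgv, hgn, decide_eq_false_iff_not]; exact hc
      simp only [Option.bind_eq_bind, Option.bind_some]
      rw [hih]
      simp [hgv, hgn, hc]

-- the value A's second loop stores for a key, as one function
def pvVal (d : PySem.Dict String String) (j1 j2 j3 j4 j5 : String) (key : String) : String :=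
  if key == "blackhole" then j1 else if key == "nexthop" then j2 else if key == "ifname" then j3
  else if key == "distance" then j4 else if key == "nexthop-vrf" then j5 else (d.get? key).getD ""

-- A's second loop inserts fresh keys only, so its items are an append
theorem pvFoldAItems (d : PySem.Dict String String) (j1 j2 j3 j4 j5 : String) :
    ∀ (ks : List String) (acc : PySem.Dict String String), ks.Nodup →
      (∀ k ∈ ks, acc.contains k = false) →
      (List.foldl (fun acc key =>
          if key == "bfd" then acc
          else if key == "blackhole" then acc.insert key j1
          else if key == "nexthop" then acc.insert key j2
          else if key == "ifname" then acc.insert key j3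
          else if key == "distance" then acc.insert key j4
          else if key == "nexthop-vrf" then acc.insert key j5
          else acc.insert key ((d.get? key).getD "")) acc ks).items
        = acc.items ++ ks.filterMap (fun key => if key == "bfd" then none
            else some (key, pvVal d j1 j2 j3 j4 j5 key)) := by
  intro ks
  induction ks with
  | nil => simp
  | cons k ks ih =>
    intro acc hnd hfresh
    have hfreshk : acc.contains k = false := hfresh k List.mem_cons_self
    have hfresh' : ∀ (v : String), ∀ k' ∈ ks, (acc.insert k v).contains k' = false := by
      intro v k' hk'
      rw [PySem.Dict.contains_insert]
      have h1 : (k' == k) = false := by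
        simp only [beq_eq_false_iff_ne, ne_eq]
        rintro rfl
        exact (List.nodup_cons.mp hnd).1 hk'
      simp [h1, hfresh k' (List.mem_cons_of_mem _ hk')]
    simp only [List.foldl_cons, List.filterMap_cons]
    by_cases hb : (k == "bfd") = true
    · rw [if_pos hb, if_pos hb,
        ih acc hnd.of_cons (fun k' hk' => hfresh k' (List.mem_cons_of_mem _ hk'))]
    · rw [if_neg hb, if_neg hb]
      by_cases c1 : (k == "blackhole") = true
      · rw [if_pos c1, show pvVal d j1 j2 j3 j4 j5 k = j1 from by unfold pvVal; rw [if_pos c1],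
          ih _ hnd.of_cons (hfresh' j1), PySem.Dict.items_insert_of_not_contains acc j1 hfreshk]
        simp
      · rw [if_neg c1]
        by_cases c2 : (k == "nexthop") = true
        · rw [if_pos c2, show pvVal d j1 j2 j3 j4 j5 k = j2 from by
              unfold pvVal; rw [if_neg c1, if_pos c2],
            ih _ hnd.of_cons (hfresh' j2), PySem.Dict.items_insert_of_not_contains acc j2 hfreshk]
          simp
        · rw [if_neg c2]
          by_cases c3 : (k == "ifname") = true
          · rw [if_pos c3, show pvVal d j1 j2 j3 j4 j5 k = j3 from by
                unfold pvVal; rw [if_neg c1, if_neg c2, if_pos c3],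
              ih _ hnd.of_cons (hfresh' j3), PySem.Dict.items_insert_of_not_contains acc j3 hfreshk]
            simp
          · rw [if_neg c3]
            by_cases c4 : (k == "distance") = true
            · rw [if_pos c4, show pvVal d j1 j2 j3 j4 j5 k = j4 from by
                  unfold pvVal; rw [if_neg c1, if_neg c2, if_neg c3, if_pos c4],
                ih _ hnd.of_cons (hfresh' j4), PySem.Dict.items_insert_of_not_contains acc j4 hfreshk]
              simp
            · rw [if_neg c4]
              by_cases c5 : (k == "nexthop-vrf") = true
              · rw [if_pos c5, show pvVal d j1 j2 j3 j4 j5 k = j5 from by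
                    unfold pvVal; rw [if_neg c1, if_neg c2, if_neg c3, if_neg c4, if_pos c5],
                  ih _ hnd.of_cons (hfresh' j5), PySem.Dict.items_insert_of_not_contains acc j5 hfreshk]
                simp
              · rw [if_neg c5, show pvVal d j1 j2 j3 j4 j5 k = (d.get? k).getD "" from by
                    unfold pvVal; rw [if_neg c1, if_neg c2, if_neg c3, if_neg c4, if_neg c5],
                  ih _ hnd.of_cons (hfresh' _), PySem.Dict.items_insert_of_not_contains acc _ hfreshk]
                simp

theorem pvOfListItemsAux : ∀ (qs : List (String × String)) (acc : PySem.Dict String String),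
    (qs.map Prod.fst).Nodup → (∀ p ∈ qs, acc.contains p.1 = false) →
    (List.foldl (fun a (p : String × String) => a.insert p.1 p.2) acc qs).items = acc.items ++ qs := by
  intro qs
  induction qs with
  | nil => simp
  | cons p qs ih =>
    intro acc hnd hfresh
    simp only [List.foldl_cons]
    rw [ih (acc.insert p.1 p.2) (by simpa using hnd.of_cons)]
    · rw [PySem.Dict.items_insert_of_not_contains acc p.2 (hfresh p (List.mem_cons_self))]
      simp
    · intro q hq
      rw [PySem.Dict.contains_insert]
      have hnd' : p.1 ∉ qs.map Prod.fst ∧ (qs.map Prod.fst).Nodup := List.nodup_cons.mp (by simpa using hnd)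
      have h1 : (q.1 == p.1) = false := by
        simp only [beq_eq_false_iff_ne, ne_eq]
        intro he
        exact hnd'.1 (he ▸ List.mem_map_of_mem (f := Prod.fst) hq)
      simp [h1, hfresh q (List.mem_cons_of_mem _ hq)]

theorem pvOfListItems : ∀ (qs : List (String × String)), (qs.map Prod.fst).Nodup →
    (PySem.Dict.ofList qs).items = qs := by
  intro qs h
  show (PySem.Dict.empty.update qs).items = qs
  unfold PySem.Dict.update
  rw [pvOfListItemsAux qs PySem.Dict.empty h (fun p _ => by simp [PySem.Dict.contains, PySem.Dict.empty])]
  simp [PySem.Dict.empty]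

theorem pvSpecialGetD (j1 j2 j3 j4 j5 : String) (k v : String) :
    (PySem.Dict.ofList [("blackhole", j1), ("nexthop", j2), ("ifname", j3), ("distance", j4), ("nexthop-vrf", j5)]).getD k v
      = (if k == "blackhole" then j1 else if k == "nexthop" then j2 else if k == "ifname" then j3
         else if k == "distance" then j4 else if k == "nexthop-vrf" then j5 else v) := by
  have h : PySem.Dict.ofList [("blackhole", j1), ("nexthop", j2), ("ifname", j3), ("distance", j4), ("nexthop-vrf", j5)]
      = PySem.Dict.mk [("blackhole", j1), ("nexthop", j2), ("ifname", j3), ("distance", j4), ("nexthop-vrf", j5)] := rfl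
  rw [h, PySem.Dict.getD_eq_get?_getD]
  simp only [PySem.Dict.get?_mk_cons]
  rw [Bool.beq_comm (a := "blackhole") (b := k), Bool.beq_comm (a := "nexthop") (b := k),
    Bool.beq_comm (a := "ifname") (b := k), Bool.beq_comm (a := "distance") (b := k),
    Bool.beq_comm (a := "nexthop-vrf") (b := k)]
  split_ifs <;> simp [PySem.Dict.get?]

theorem pvMapFstFilterMap (g : String × String → String) :
    ∀ (ps : List (String × String)),
      ((ps.filterMap (fun kv => if kv.1 == "bfd" then none else some (kv.1, g kv))).map Prod.fst)
        = (ps.map Prod.fst).filter (fun k => !(k == "bfd")) := by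
  intro ps
  induction ps with
  | nil => rfl
  | cons kv ps ih =>
    by_cases hb : kv.1 = "bfd" <;> simp [hb] <;> simpa using ih

-- ===== VERDICT (by name: the statement is the Claim_ definition above) =====
theorem reconstruct_static_route_config_spec : Claim_equal_reconstruct_static_route_config := by
  intro oc rn _ hpre
  unfold Spec_reconstruct_static_route_config
  unfold Pre_reconstruct_static_route_config at hpre
  cases h1 : ((PySem.Dict.ofList oc).get? "nexthop").bind pvAArgList with
  | none =>
    rw [h1] at hpre
    cases h2 : ((PySem.Dict.ofList oc).get? "nexthop-vrf").bind pvAArgList <;>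
      rw [h2] at hpre <;> simp at hpre
  | some nhl =>
    cases h2 : ((PySem.Dict.ofList oc).get? "nexthop-vrf").bind pvAArgList with
    | none => rw [h1, h2] at hpre; simp at hpre
    | some vrfl =>
      rw [h1, h2] at hpre
      simp only [Bool.and_eq_true, decide_eq_true_eq, List.all_eq_true] at hpre
      obtain ⟨hlen, hall⟩ := hpre
      have hmem : ∀ i ∈ PySem.List.pyRange 0 (nhl.length : Int) 1, ∃ k : Nat, i = (k : Int) ∧ k < nhl.length ∧
          ((PySem.List.pyGetD vrfl i "", PySem.List.pyGetD nhl i "") ∈ rn →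
            pvPreAux (((PySem.Dict.ofList oc).get? "blackhole").bind pvAArgList) k = true ∧
            pvPreAux (((PySem.Dict.ofList oc).get? "ifname").bind pvAArgList) k = true ∧
            pvPreAux (((PySem.Dict.ofList oc).get? "distance").bind pvAArgList) k = true) := by
        intro i hi
        rw [PySem.List.mem_pyRange_one] at hi
        obtain ⟨h0, hlt⟩ := hi
        have hk : i.toNat < nhl.length := by omega
        refine ⟨i.toNat, by omega, hk, ?_⟩
        intro hin
        have := hall i.toNat (List.mem_range.mpr hk)
        rw [Bool.or_eq_true] at this
        rcases this with hfalse | htrue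
        · exfalso
          rw [Bool.not_eq_true', decide_eq_false_iff_not] at hfalse
          apply hfalse
          have hi' : i = ((i.toNat : Nat) : Int) := by omega
          rw [hi'] at hin
          rw [PySem.List.pyGetD_natCast, PySem.List.pyGetD_natCast] at hin
          exact hin
        · simp only [Bool.and_eq_true] at htrue
          exact ⟨htrue.1.1, htrue.1.2, htrue.2⟩
      have hloop := pvLoopA rn (((PySem.Dict.ofList oc).get? "blackhole").bind pvAArgList)
        (((PySem.Dict.ofList oc).get? "ifname").bind pvAArgList)
        (((PySem.Dict.ofList oc).get? "distance").bind pvAArgList)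
        nhl vrfl hlen (PySem.List.pyRange 0 (nhl.length : Int) 1) hmem ("", "", "", "", "")
      simp only [reconstruct_static_route_config, reconstruct_static_route_config_alt,
        pvArgList_eq, h1, h2, hloop, if_pos hlen]
      simp only [String.empty_append, pvCat_slice]
      -- both sides are now items of an insert into the rebuilt dict; show the rebuilt dicts are equal
      have hkeys : (PySem.Dict.ofList oc).keys.Nodup := PySem.Dict.nodup_keys_ofList oc
      have hXY : ∀ (X Y : PySem.Dict String String), X = Y →
          (X.insert "expiry" "false").items = (Y.insert "expiry" "false").items := by
        intro X Y h; rw [h]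
      apply hXY
      apply PySem.Dict.ext
      rw [pvFoldAItems]
      · rw [pvOfListItems]
        · simp only [show (PySem.Dict.empty : PySem.Dict String String).items = [] from rfl,
            List.nil_append]
          rw [show (PySem.Dict.ofList oc).keys = (PySem.Dict.ofList oc).items.map Prod.fst from rfl,
            List.filterMap_map]
          apply List.filterMap_congr
          intro kv hkv
          simp only [Function.comp_apply]
          by_cases hb : (kv.1 == "bfd") = true
          · rw [if_pos hb, if_pos hb]
          · rw [if_neg hb, if_neg hb, pvSpecialGetD]
            have hkv2 : (PySem.Dict.ofList oc).get? kv.1 = some kv.2 :=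
              PySem.Dict.get?_of_mem_items _ hkv hkeys
            unfold pvVal
            split_ifs <;> simp [hkv2]
        · rw [pvMapFstFilterMap]
          exact List.Nodup.filter _ hkeys
      · exact hkeys
      · intro k _
        rfl
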